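-- pv_equiv track=rewrite | github.com/miloszdobosz/Tekstowe | zad1/zad1.py | automat
-- ===== SOURCE A (Python) =====
-- def transition_table(pattern):
--     alphabet = {e for e in pattern}
--     result = []
--
--     for q in range(0, len(pattern) + 1):
--         result.append({})
--
--         for a in alphabet:
--             k = min(len(pattern) + 1, q + 2)
--
--             while True:
--                 k = k - 1
--                 # x[:k] - prefiks o długości k
--                 # x[-k:] - sufiks o długości k
--                 if(k == 0 or pattern[:k] == (pattern[:q] + a)[-k:]):
--                     break
--
--             result[q][a] = k
--     return result
--
-- def automat(text, pattern):
--     result = []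
--     table = transition_table(pattern)
--
--     length = len(pattern)
--     q = 0
--
--     for i, t in enumerate(text):
--         if t in table[q]:
--             q = table[q][t]
--
--             if q == length:
--                 # DOPASOWANIE
--                 result.append(i - length + 1)
--
--         else:
--             q = 0
--
--     return result
-- ===== SOURCE B (Python) =====
-- def automat(text, pattern):
--     m = len(pattern)
--     return [i for i in range(len(text) - m + 1) if text[i:i+m] == pattern]
-- ===== Notes on version B (the rewrite author's own statement) =====
-- stated objective: faster
-- what changed: Replaced the finite-automaton matcher (cubic-in-m transition-table construction plus a state-machine scan) by a direct scan comparing the length-m window at each start position, removing the table build entirely.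
-- outside the precondition, e.g. on automat('ab', ''): A returns [], B returns [0, 1, 2]
import Mathlib
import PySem

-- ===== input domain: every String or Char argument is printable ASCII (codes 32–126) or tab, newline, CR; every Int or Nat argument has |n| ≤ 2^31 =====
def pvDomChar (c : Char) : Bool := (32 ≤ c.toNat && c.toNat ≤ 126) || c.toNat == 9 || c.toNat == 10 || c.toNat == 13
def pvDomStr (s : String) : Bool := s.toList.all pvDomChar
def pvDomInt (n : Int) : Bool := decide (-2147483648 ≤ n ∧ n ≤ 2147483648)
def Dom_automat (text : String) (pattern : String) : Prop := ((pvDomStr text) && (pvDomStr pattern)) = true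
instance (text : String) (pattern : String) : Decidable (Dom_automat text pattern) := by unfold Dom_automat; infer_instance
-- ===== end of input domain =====

-- B replaces A's automaton matcher (cubic-in-m transition-table build + state scan) by a direct
-- window comparison at each start position: same occurrence list, no table build (objective: faster).


-- ===== PORT A =====
-- the inner `while True` of transition_table: the argument is the value of k BEFORE the
-- decrement `k = k - 1`; Python's short-circuit `k == 0 or …` is the left disjunct
def pvTblLoop (P s : List Char) : Nat → Nat
  | 0 => 0
  | k + 1 =>
      if k = 0 ∨ PySem.List.slice P none (some (k : Int)) = PySem.List.slice s (some (-(k : Int))) none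
      then k else pvTblLoop P s k

-- one row result[q] (iterating the alphabet set; the dict's lookups do not depend on the
-- set's iteration order, only the items order would — and automat only looks keys up)
def pvRow (P : List Char) (q : Int) : PySem.Dict Char Int :=
  (PySem.Set.ofList P).foldl
    (fun d a =>
      d.insert a
        ((pvTblLoop P (PySem.List.slice P none (some q) ++ [a])
            ((min ((P.length : Int) + 1) (q + 2)).toNat) : Nat) : Int))
    PySem.Dict.empty

def pvTable (P : List Char) : List (PySem.Dict Char Int) :=
  (PySem.List.pyRange 0 ((P.length : Int) + 1)).foldl (fun acc q => acc ++ [pvRow P q]) []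

-- loop body of automat; st.1 stays in [0, len(pattern)], so `pyGet? table st.1` never misses
-- and getD's default dict is never used (Python's table[q] cannot raise here)
def pvStepA (table : List (PySem.Dict Char Int)) (length : Int)
    (st : Int × List Int) (ic : Int × Char) : Int × List Int :=
  match ((PySem.List.pyGet? table st.1).getD PySem.Dict.empty).get? ic.2 with
  | some k => (k, if k = length then st.2 ++ [ic.1 - length + 1] else st.2)
  | none => (0, st.2)

def automat (text : String) (pattern : String) : List Int :=
  let table := pvTable pattern.toList
  let length : Int := (pattern.toList.length : Int)
  ((PySem.List.enumerate text.toList).foldl (pvStepA table length) (0, [])).2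

-- ===== PORT B =====
def automat_alt (text : String) (pattern : String) : List Int :=
  let T := text.toList
  let m : Int := (pattern.toList.length : Int)
  (PySem.List.pyRange 0 ((T.length : Int) - m + 1)).filter
    (fun i => decide (PySem.List.slice T (some i) (some (i + m)) = pattern.toList))

-- ===== PRECONDITION & SPEC =====
-- Pre_ excludes only the empty pattern, a defensible corner where no behaviour is specified:
-- A's automaton has an empty alphabet and returns [], while B reports the empty pattern as
-- occurring at every position — both readings are legitimate, so it is carved out.
def Pre_automat (text : String) (pattern : String) : Prop := pattern ≠ ""
instance (text : String) (pattern : String) : Decidable (Pre_automat text pattern) := by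
  unfold Pre_automat; infer_instance

def pvWitness_automat : String × String := ("ababa", "aba")

def Spec_automat (text : String) (pattern : String) (out : List Int) : Prop := out = automat_alt text pattern
instance (text : String) (pattern : String) (out : List Int) : Decidable (Spec_automat text pattern out) := by unfold Spec_automat; infer_instance

-- ===== CLAIM (what is proved, stated in full; the proofs are below) =====
def Claim_equal_automat : Prop := ∀ (text : String) (pattern : String), Dom_automat text pattern → Pre_automat text pattern → Spec_automat text pattern (automat text pattern)

-- ===== LEMMAS AND PROOFS =====

theorem pvTblLoop_eq (P s : List Char) (k : Nat) :
    pvTblLoop P s (k + 1)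
      = Nat.findGreatest (fun j => P.take j = s.drop (s.length - j)) k := by
  induction k with
  | zero => simp [pvTblLoop]
  | succ k ih =>
      rw [Nat.findGreatest_succ]
      show (if k + 1 = 0 ∨ PySem.List.slice P none (some ((k+1 : Nat) : Int)) = PySem.List.slice s (some (-((k+1 : Nat) : Int))) none
      then k + 1 else pvTblLoop P s (k+1)) = _
      rw [PySem.List.slice_to_natCast, PySem.List.slice_from_neg_natCast s (k+1) (Nat.succ_pos k), ih]
      simp

theorem pvFindGreatest_congr {p q : Nat → Prop} [DecidablePred p] [DecidablePred q]
    (n : Nat) (h : ∀ k ≤ n, (p k ↔ q k)) :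
    Nat.findGreatest p n = Nat.findGreatest q n := by
  induction n with
  | zero => rfl
  | succ n ih =>
      rw [Nat.findGreatest_succ, Nat.findGreatest_succ]
      rw [if_congr (h (n+1) le_rfl) rfl (ih (fun k hk => h k (Nat.le_succ_of_le hk)))]

theorem pvSuffix_eq_drop {α : Type} {u v : List α} (h : u <:+ v) :
    u = v.drop (v.length - u.length) := by
  obtain ⟨w, rfl⟩ := h
  simp

theorem pvTake_eq_drop_iff_suffix (P s : List Char) (j : Nat) (hjm : j ≤ P.length) :
    (P.take j = s.drop (s.length - j)) ↔ P.take j <:+ s := by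
  constructor
  · intro h; rw [h]; exact List.drop_suffix _ _
  · intro h
    have := pvSuffix_eq_drop h
    rwa [List.length_take, min_eq_left hjm] at this

-- row items
theorem pvRow_items (P : List Char) (q : Int) :
    (pvRow P q).items = (PySem.Set.ofList P).map (fun a => (a,
        ((pvTblLoop P (PySem.List.slice P none (some q) ++ [a])
            ((min ((P.length : Int) + 1) (q + 2)).toNat) : Nat) : Int))) := by
  unfold pvRow
  rw [PySem.Dict.items_foldl_insert_fresh _ _ _ _ (fun a _ => PySem.Dict.contains_empty a)
    (by simp [PySem.Set.nodup_ofList P])]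
  simp [show (PySem.Dict.empty : PySem.Dict Char Int).items = [] from rfl]

theorem pvRow_get? (P : List Char) (q : Nat) (a : Char) (hq : q ≤ P.length) :
    (pvRow P (q : Int)).get? a
      = if a ∈ P then
          some ((Nat.findGreatest (fun k => P.take k <:+ P.take q ++ [a])
                  (min P.length (q + 1)) : Nat) : Int)
        else none := by
  have hkeys : (pvRow P (q : Int)).keys = PySem.Set.ofList P := by
    show (pvRow P (q : Int)).items.map (·.1) = _
    rw [pvRow_items]; simp [Function.comp_def]
  have hnodup : (pvRow P (q : Int)).keys.Nodup := by
    rw [hkeys]; exact PySem.Set.nodup_ofList P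
  have hval : ((pvTblLoop P (PySem.List.slice P none (some (q : Int)) ++ [a])
            ((min ((P.length : Int) + 1) ((q : Int) + 2)).toNat) : Nat) : Int)
      = ((Nat.findGreatest (fun k => P.take k <:+ P.take q ++ [a]) (min P.length (q + 1)) : Nat) : Int) := by
    have h1 : PySem.List.slice P none (some (q : Int)) = P.take q := PySem.List.slice_to_natCast P q
    have h2 : (min ((P.length : Int) + 1) ((q : Int) + 2)).toNat = min P.length (q + 1) + 1 := by
      omega
    rw [h1, h2, pvTblLoop_eq]
    congr 1
    apply pvFindGreatest_congr
    intro k hk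
    have hkm : k ≤ P.length := le_trans hk (min_le_left _ _)
    exact pvTake_eq_drop_iff_suffix P (P.take q ++ [a]) k hkm
  by_cases hmem : a ∈ P
  · rw [if_pos hmem]
    have : (a, ((pvTblLoop P (PySem.List.slice P none (some (q:Int)) ++ [a])
            ((min ((P.length : Int) + 1) ((q:Int) + 2)).toNat) : Nat) : Int)) ∈ (pvRow P (q : Int)).items := by
      rw [pvRow_items]
      exact List.mem_map_of_mem ((PySem.Set.mem_ofList _ _).2 hmem)
    rw [PySem.Dict.get?_of_mem_items _ this hnodup, hval]
  · rw [if_neg hmem]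
    rw [PySem.Dict.get?_eq_none_iff_not_mem_keys, hkeys]
    exact fun h => hmem ((PySem.Set.mem_ofList _ _).1 h)

theorem pvTable_get (P : List Char) (q : Nat) (hq : q ≤ P.length) :
    PySem.List.pyGet? (pvTable P) (q : Int) = some (pvRow P (q : Int)) := by
  unfold pvTable
  rw [PySem.List.foldl_append_singleton_eq_map, List.nil_append, PySem.List.pyGet?_natCast,
    List.getElem?_map, PySem.List.getElem?_pyRange_one]
  simp only [sub_zero]
  rw [if_pos (by omega)]
  simp

def pvF (P s : List Char) : Nat := Nat.findGreatest (fun k => P.take k <:+ s) P.length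

theorem pvF_le (P s : List Char) : pvF P s ≤ P.length := Nat.findGreatest_le _

theorem pvF_spec (P s : List Char) : P.take (pvF P s) <:+ s :=
  Nat.findGreatest_spec (P := fun k => P.take k <:+ s) (Nat.zero_le _) (by simp)

theorem pvF_ge (P s : List Char) (k : Nat) (hk : k ≤ P.length) (h : P.take k <:+ s) :
    k ≤ pvF P s := Nat.le_findGreatest hk h

theorem pvF_nil (P : List Char) (hP : P ≠ []) : pvF P [] = 0 := by
  rw [pvF, Nat.findGreatest_eq_zero_iff]
  intro n hn _ h
  have : P.take n = [] := List.suffix_nil.mp h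
  rw [List.take_eq_nil_iff] at this
  rcases this with h1 | h2
  · omega
  · exact hP h2

theorem pvSnoc_suffix_snoc {u v : List Char} {x y : Char} (h : u ++ [x] <:+ v ++ [y]) :
    x = y ∧ u <:+ v := by
  rw [← List.reverse_prefix] at h
  simp only [List.reverse_append, List.reverse_cons, List.reverse_nil, List.nil_append,
    List.cons_append] at h
  rw [List.cons_prefix_cons] at h
  exact ⟨h.1, List.reverse_prefix.mp h.2⟩

theorem pvTake_suffix_snoc {P s : List Char} {a : Char} {k : Nat} (hk : 0 < k)
    (hkm : k ≤ P.length) (h : P.take k <:+ s ++ [a]) :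
    P.take (k - 1) <:+ s ∧ P.take k = P.take (k - 1) ++ [a] := by
  have hlt : k - 1 < P.length := by omega
  have htk : P.take k = P.take (k - 1) ++ [P[k-1]] := by
    conv_lhs => rw [show k = (k - 1) + 1 by omega]
    rw [List.take_add_one]; simp [List.getElem?_eq_getElem hlt]
  rw [htk] at h
  obtain ⟨hxy, hsuf⟩ := pvSnoc_suffix_snoc h
  exact ⟨hsuf, by rw [htk, hxy]⟩

theorem pvF_not_mem (P s : List Char) (a : Char) (ha : a ∉ P) : pvF P (s ++ [a]) = 0 := by
  by_contra h0
  have hk : 0 < pvF P (s ++ [a]) := Nat.pos_of_ne_zero h0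
  obtain ⟨_, htk⟩ := pvTake_suffix_snoc hk (pvF_le P _) (pvF_spec P (s ++ [a]))
  have : a ∈ P.take (pvF P (s ++ [a])) := by rw [htk]; simp
  exact ha (List.mem_of_mem_take this)

theorem pvF_eq_length_iff (P u : List Char) :
    (pvF P u = P.length ↔ P <:+ u) := by
  constructor
  · intro h
    have := pvF_spec P u
    rwa [h, List.take_length] at this
  · intro h
    exact le_antisymm (pvF_le P u) (pvF_ge P u P.length le_rfl (by rwa [List.take_length]))

theorem pvF_step (P s : List Char) (a : Char) :
    pvF P (s ++ [a])
      = Nat.findGreatest (fun k => P.take k <:+ P.take (pvF P s) ++ [a])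
          (min P.length (pvF P s + 1)) := by
  set q := pvF P s with hq
  apply le_antisymm
  · -- F1 ≤ F2
    set k := pvF P (s ++ [a]) with hkdef
    rcases Nat.eq_zero_or_pos k with h0 | hk
    · simp [h0]
    obtain ⟨hsuf, htk⟩ := pvTake_suffix_snoc hk (pvF_le P _) (pvF_spec P (s ++ [a]))
    have hk1q : k - 1 ≤ q := pvF_ge P s (k - 1) (by have := pvF_le P (s ++ [a]); omega) hsuf
    have hkq : k ≤ min P.length (q + 1) := by
      have := pvF_le P (s ++ [a]); omega
    apply Nat.le_findGreatest hkq
    -- P.take k <:+ P.take q ++ [a]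
    have hsub : P.take (k - 1) <:+ P.take q :=
      List.suffix_of_suffix_length_le hsuf (pvF_spec P s)
        (by
          rw [List.length_take, List.length_take]
          have h1 := pvF_le P (s ++ [a]); have h2 := pvF_le P s
          omega)
    rw [htk]
    obtain ⟨w, hw⟩ := hsub
    exact ⟨w, by rw [← List.append_assoc, hw]⟩
  · -- F2 ≤ F1
    set k := Nat.findGreatest (fun k => P.take k <:+ P.take q ++ [a]) (min P.length (q + 1)) with hk
    have hspec : P.take k <:+ P.take q ++ [a] :=
      Nat.findGreatest_spec (P := fun k => P.take k <:+ P.take q ++ [a]) (Nat.zero_le _) (by simp)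
    have hkm : k ≤ P.length := le_trans (Nat.findGreatest_le _) (min_le_left _ _)
    apply pvF_ge P (s ++ [a]) k hkm
    have : P.take q ++ [a] <:+ s ++ [a] := by
      obtain ⟨w, hw⟩ := pvF_spec P s
      exact ⟨w, by rw [← List.append_assoc, hw]⟩
    exact hspec.trans this


theorem pvStepA_eq (P s : List Char) (res : List Int) (j : Int) (c : Char) (hP : P ≠ []) :
    pvStepA (pvTable P) (P.length : Int) ((pvF P s : Int), res) (j, c)
      = ((pvF P (s ++ [c]) : Int),
         res ++ if pvF P (s ++ [c]) = P.length then [j - (P.length : Int) + 1] else []) := by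
  have hq := pvF_le P s
  have hm : P.length ≠ 0 := by simpa using hP
  unfold pvStepA
  simp only
  rw [pvTable_get P (pvF P s) hq, Option.getD_some, pvRow_get? P (pvF P s) c hq]
  by_cases hc : c ∈ P
  · rw [if_pos hc, ← pvF_step P s c]
    simp only
    by_cases he : pvF P (s ++ [c]) = P.length
    · rw [if_pos he, if_pos (by exact_mod_cast he)]
    · rw [if_neg he, if_neg (by exact_mod_cast he), List.append_nil]
  · rw [if_neg hc]
    simp only
    rw [pvF_not_mem P s c hc]
    rw [if_neg (by omega), List.append_nil]
    simp

theorem pvFilterMap_range_succ (g : Nat → Option Int) (n : Nat) :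
    (List.range (n + 1)).filterMap g
      = (g 0).toList ++ (List.range n).filterMap (fun k => g (k + 1)) := by
  rw [List.range_succ_eq_map, List.filterMap_cons, List.filterMap_map]
  cases h : g 0 <;> simp [*]

theorem pvLoopA (P : List Char) (hP : P ≠ []) :
    ∀ (rest s : List Char) (res : List Int),
      (PySem.List.enumerate rest (s.length : Int)).foldl
          (pvStepA (pvTable P) (P.length : Int)) ((pvF P s : Int), res)
        = ((pvF P (s ++ rest) : Int),
           res ++ (List.range rest.length).filterMap (fun k =>
              if pvF P (s ++ rest.take (k + 1)) = P.length
              then some (((s.length : Int) + k) - (P.length : Int) + 1) else none)) := by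
  intro rest
  induction rest with
  | nil => intro s res; simp [PySem.List.enumerate]
  | cons c rest ih =>
      intro s res
      rw [PySem.List.enumerate_cons, List.foldl_cons, pvStepA_eq P s res _ c hP]
      have hlen : (s.length : Int) + 1 = ((s ++ [c]).length : Int) := by simp
      rw [hlen, ih (s ++ [c])]
      have hcons : s ++ [c] ++ rest = s ++ c :: rest := by simp
      refine Prod.ext (by rw [hcons]) ?_
      simp only [List.length_cons]
      rw [pvFilterMap_range_succ, List.append_assoc]
      congr 1
      congr 1
      · by_cases h : pvF P (s ++ [c]) = P.length <;>
          simp [List.take_succ_cons, h]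
      · apply List.filterMap_congr
        intro k _
        simp only [List.take_succ_cons]
        by_cases h : pvF P (s ++ c :: rest.take (k + 1)) = P.length
        · rw [if_pos (by simpa using h), if_pos h]
          congr 1
          simp only [List.length_append, List.length_cons, List.length_nil]
          push_cast
          ring
        · rw [if_neg (by simpa using h), if_neg h]

theorem pvWindow_iff (P T : List Char) (N : Nat) (hm : P.length ≤ N + 1)
    (hN : N + 1 ≤ T.length) :
    (P <:+ T.take (N + 1) ↔ (T.drop (N + 1 - P.length)).take P.length = P) := by
  set m := P.length with hmdef
  set j := N + 1 - m with hj
  have hseg : (T.drop j).take m = (T.take (N + 1)).drop j := by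
    rw [List.drop_take, show N + 1 - j = m from by omega]
  have hlen : ((T.drop j).take m).length = m := by
    rw [List.length_take, List.length_drop]
    omega
  constructor
  · intro h
    have hsuf : (T.drop j).take m <:+ T.take (N + 1) := by
      rw [hseg]; exact List.drop_suffix _ _
    have hPsuf : P <:+ (T.drop j).take m :=
      List.suffix_of_suffix_length_le h hsuf (by rw [hlen])
    exact ((List.IsSuffix.eq_of_length hPsuf (by rw [hlen])).symm)
  · intro h
    rw [← h, hseg]
    exact List.drop_suffix _ _

theorem pvReindex (P T : List Char) (hP : P ≠ []) :
    ∀ N, N ≤ T.length →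
      (List.range N).filterMap (fun i =>
          if P <:+ T.take (i + 1) then some ((i : Int) - (P.length : Int) + 1) else none)
        = ((List.range (N + 1 - P.length)).filter
            (fun j => decide ((T.drop j).take P.length = P))).map (fun (j : Nat) => (j : Int)) := by
  have hm : 0 < P.length := List.length_pos_of_ne_nil hP
  intro N
  induction N with
  | zero =>
      intro _
      rw [show 0 + 1 - P.length = 0 from by omega]
      simp
  | succ N ihN =>
      intro hN
      rw [List.range_succ, List.filterMap_append, ihN (by omega)]
      by_cases hbig : P.length ≤ N + 1
      · rw [show N + 1 + 1 - P.length = (N + 1 - P.length) + 1 from by omega,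
          List.range_succ, List.filter_append, List.map_append]
        congr 1
        simp only [List.filterMap_cons, List.filterMap_nil, List.filter_cons,
          List.filter_nil, decide_eq_true_eq]
        rw [if_congr (pvWindow_iff P T N hbig hN) rfl rfl]
        by_cases h : (T.drop (N + 1 - P.length)).take P.length = P
        · rw [if_pos h]
          simp only [h, if_true, List.map_cons, List.map_nil]
          congr 1
          omega
        · rw [if_neg h]
          simp [h]
      · rw [show N + 1 + 1 - P.length = N + 1 - P.length from by omega]
        have hfalse : ¬ P <:+ T.take (N + 1) := by
          intro hsuf
          have := hsuf.length_le
          rw [List.length_take] at this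
          omega
        simp [hfalse]

-- ===== VERDICT (by name: the statement is the Claim_ definition above) =====
theorem automat_spec : Claim_equal_automat := by
  intro text pattern _ hpre
  unfold Spec_automat automat automat_alt
  simp only
  set P := pattern.toList with hPdef
  set T := text.toList with hTdef
  have hP : P ≠ [] := fun h => hpre (String.toList_eq_nil_iff.mp h)
  have hloop := pvLoopA P hP T [] []
  simp only [List.nil_append, List.length_nil, Nat.cast_zero, pvF_nil P hP, zero_add] at hloop
  rw [hloop]
  simp only
  have hcong : ∀ i ∈ List.range T.length,
      (if pvF P (T.take (i + 1)) = P.length then some ((i : Int) - (P.length : Int) + 1) else none)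
        = (if P <:+ T.take (i + 1) then some ((i : Int) - (P.length : Int) + 1) else none) := by
    intro i _
    rw [if_congr (pvF_eq_length_iff P _) rfl rfl]
  rw [List.filterMap_congr hcong, pvReindex P T hP T.length le_rfl]
  rw [PySem.List.pyRange_one]
  simp only [zero_add]
  have hK : (((T.length : Int) - (P.length : Int) + 1) - 0).toNat = T.length + 1 - P.length := by
    omega
  rw [List.filter_map, hK]
  apply congrArg
  apply List.filter_congr
  intro j _
  simp [Function.comp, PySem.List.slice_natCast_add]
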